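-- pv_equiv track=rewrite | github.com/shawnvogt/MLH-Technical-Interview-Workshop | main.py | triplet
-- ===== SOURCE A (Python) =====
-- def triplet(nums):
--   a = [n**2 for n in sorted(nums)]
--   for i in range(len(a)-1, 1, -1):
--     for j in range(i-1,0,-1):
--       lookingfor = a[i] - a[j]
--       if lookingfor in a[0:j]:
--         return "Yes"
--   return "No"
-- ===== SOURCE B (Python) =====
-- def triplet(nums):
--   a = sorted(n * n for n in nums)
--   for i in range(len(a) - 1, 1, -1):
--     lo, hi = 0, i - 1
--     while lo < hi:
--       s = a[lo] + a[hi]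
--       if s == a[i]:
--         return "Yes"
--       if s < a[i]:
--         lo += 1
--       else:
--         hi -= 1
--   return "No"
-- ===== Notes on version B (the rewrite author's own statement) =====
-- stated objective: faster
-- what changed: B sorts the squares and runs a two-pointer pair search per largest element instead of A's nested index loops with a linear slice-membership scan; B also fixes A's ordering bug (A squares after sorting, so its list is unsorted for negative inputs).
-- intended difference: On inputs containing three entries whose squares satisfy x+y=z, but none doing so with the squares taken in increasing order of the entries' values - e.g. [-5,-4,3] - A returns "No" while B returns "Yes"; B's answer is intended since the input really contains a valid triple and A misses it only because it squares after sorting. — e.g. on triplet([-5, -4, 3]): A returns "No", B returns "Yes"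
import Mathlib
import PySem

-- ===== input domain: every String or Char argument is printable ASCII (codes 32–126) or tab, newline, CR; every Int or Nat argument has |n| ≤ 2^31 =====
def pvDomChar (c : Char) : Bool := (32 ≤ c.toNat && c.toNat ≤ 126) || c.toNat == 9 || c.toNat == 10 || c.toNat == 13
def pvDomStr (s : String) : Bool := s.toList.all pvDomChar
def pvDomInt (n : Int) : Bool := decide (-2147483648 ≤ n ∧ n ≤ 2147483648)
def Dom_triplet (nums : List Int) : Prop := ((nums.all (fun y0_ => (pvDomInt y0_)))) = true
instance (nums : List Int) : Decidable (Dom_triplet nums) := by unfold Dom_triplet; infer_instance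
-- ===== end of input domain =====

-- B replaces A's nested index loops with a slice-membership scan by sorted squares plus a
-- two-pointer pair search per candidate; B sorts the squares themselves, which also fixes
-- A's miss of triples involving negative inputs (see D_triplet below).

-- ===== PORT A =====
def triplet (nums : List Int) : String :=
  let a := (PySem.List.sorted nums (fun x => x) false).map (fun n => n ^ 2)
  if (PySem.List.pyRange ((PySem.List.len a) - 1) 1 (-1)).any (fun i =>
       (PySem.List.pyRange (i - 1) 0 (-1)).any (fun j =>
         (PySem.List.slice a (some 0) (some j)).contains
           (PySem.List.pyGetD a i 0 - PySem.List.pyGetD a j 0)))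
  then "Yes" else "No"

-- ===== PORT B =====
-- the 'while lo < hi' loop of Source B (its indices stay in range, so the 0 default of pyGetD is unreachable)
def twoPtr (a : List Int) (target : Int) (lo hi : Int) : Bool :=
  if lo < hi then
    let s := PySem.List.pyGetD a lo 0 + PySem.List.pyGetD a hi 0
    if s = target then true
    else if s < target then twoPtr a target (lo + 1) hi
    else twoPtr a target lo (hi - 1)
  else false
termination_by (hi - lo).toNat
decreasing_by all_goals omega

def triplet_alt (nums : List Int) : String :=
  let a := PySem.List.sorted (nums.map (fun n => n * n)) (fun x => x) false
  if (PySem.List.pyRange ((PySem.List.len a) - 1) 1 (-1)).any (fun i =>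
       twoPtr a (PySem.List.pyGetD a i 0) 0 (i - 1))
  then "Yes" else "No"

-- ===== PRECONDITION & SPEC =====
-- input condition: three distinct entries x,y,z of nums (an occurrence sub-multiset, via the
-- erase chain) whose squares satisfy x²+y²=z²; with o = False only value-ordered triples
-- x ≤ y ≤ z count — the only ones A can see
def Dtrip (l : List Int) (o : Prop) : Prop :=
  ∃ x ∈ l, ∃ y ∈ (l.erase x), ∃ z ∈ ((l.erase x).erase y),
    (o ∨ x ≤ y ∧ y ≤ z) ∧ x*x + y*y = z*z

-- On inputs containing a triple of entries whose squares satisfy x+y=z, but no triple doing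
-- so with the squares taken in increasing order of the entries' VALUES — e.g. [-5,-4,3] —
-- A returns "No" and B returns "Yes"; B's answer is intended: the input really contains a
-- valid triple, and A misses it only because it squares AFTER sorting, so its list is not
-- sorted when the input has negative numbers.
def D_triplet (nums : List Int) : Prop := Dtrip nums True ∧ ¬ Dtrip nums False

-- fast path: on a constant list no triple exists unless the value is 0, and then both an
-- unordered and an ordered triple exist, so D_triplet is false either way
instance (nums : List Int) : Decidable (D_triplet nums) :=
  if hc : nums.all (fun x => x == nums.getD 0 0) = true then
    isFalse (fun hD => by
      rw [List.all_eq_true] at hc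
      obtain ⟨⟨x, h1, y, h2, z, h3, _, heq⟩, hno⟩ := hD
      have hx := of_decide_eq_true (hc x h1)
      have hy := of_decide_eq_true (hc y (List.mem_of_mem_erase h2))
      have hz := of_decide_eq_true (hc z (List.mem_of_mem_erase (List.mem_of_mem_erase h3)))
      exact hno ⟨x, h1, y, h2, z, h3,
        Or.inr (by rw [hx, hy, hz]; exact ⟨le_refl _, le_refl _⟩), heq⟩)
  else by unfold D_triplet Dtrip; infer_instance

def Spec_triplet (nums : List Int) (out : String) : Prop := ¬ D_triplet nums → out = triplet_alt nums
instance (nums : List Int) (out : String) : Decidable (Spec_triplet nums out) := by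
  unfold Spec_triplet D_triplet Dtrip; infer_instance

def pvDiffWitness_triplet : List Int := [-5, -4, 3]
def pvDiffWitnessOut_triplet : String × String := ("No", "Yes")

-- ===== CLAIM (what is proved, stated in full; the proofs are below) =====
def Claim_unchanged_triplet : Prop := ∀ (nums : List Int), Dom_triplet nums → Spec_triplet nums (triplet nums)
def Claim_changed_triplet : Prop := Dom_triplet (pvDiffWitness_triplet) ∧ D_triplet (pvDiffWitness_triplet) ∧ triplet (pvDiffWitness_triplet) = pvDiffWitnessOut_triplet.1 ∧ triplet_alt (pvDiffWitness_triplet) = pvDiffWitnessOut_triplet.2 ∧ pvDiffWitnessOut_triplet.1 ≠ pvDiffWitnessOut_triplet.2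
def Claim_exact_triplet : Prop := ∀ (nums : List Int), Dom_triplet nums → D_triplet nums → triplet nums ≠ triplet_alt nums

-- ===== LEMMAS AND PROOFS =====

-- positional reformulations of Dun/Dord used by the loop characterisations
def DunP (nums : List Int) : Prop :=
  ∃ r < nums.length, ∃ q < r, ∃ p < q,
    let a := nums.getD p 0; let b := nums.getD q 0; let c := nums.getD r 0
    a*a + b*b = c*c ∨ a*a + c*c = b*b ∨ b*b + c*c = a*a

def DordP (nums : List Int) : Prop :=
  ∃ r < nums.length, ∃ q < r, ∃ p < q,
    let a := nums.getD p 0; let b := nums.getD q 0; let c := nums.getD r 0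
    let lo := min a (min b c); let hi := max a (max b c); let mid := a + b + c - lo - hi
    lo*lo + mid*mid = hi*hi

-- proof-side shorthands for the two squared lists the ports traverse
def sqSorted (nums : List Int) : List Int :=
  PySem.List.sorted (nums.map (fun n => n * n)) (fun x => x) false
def sortedSq (nums : List Int) : List Int :=
  (PySem.List.sorted nums (fun x => x) false).map (fun n => n ^ 2)

-- Boolean "some index triple k<j<i of x sums as x[k]+x[j]=x[i]"
def hasTriple (x : List Int) : Bool :=
  (List.range x.length).any fun i => (List.range i).any fun j => (List.range j).any fun k =>
    x.getD k 0 + x.getD j 0 == x.getD i 0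

theorem hasTriple_iff (x : List Int) :
    hasTriple x = true ↔
      ∃ i < x.length, ∃ j < i, ∃ k < j, x.getD k 0 + x.getD j 0 = x.getD i 0 := by
  simp [hasTriple]

-- A returns "Yes" exactly when its list (squares of the sorted input) has an index-ordered triple
theorem triplet_char (nums : List Int) :
    triplet nums = if hasTriple (sortedSq nums) then "Yes" else "No" := by
  have key : ((PySem.List.pyRange ((PySem.List.len (sortedSq nums)) - 1) 1 (-1)).any (fun i =>
       (PySem.List.pyRange (i - 1) 0 (-1)).any (fun j =>
         (PySem.List.slice (sortedSq nums) (some 0) (some j)).contains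
           (PySem.List.pyGetD (sortedSq nums) i 0 - PySem.List.pyGetD (sortedSq nums) j 0))) = true)
      ↔ ∃ i < (sortedSq nums).length, ∃ j < i, ∃ k < j,
          (sortedSq nums).getD k 0 + (sortedSq nums).getD j 0 = (sortedSq nums).getD i 0 := by
    set a := sortedSq nums with ha
    rw [List.any_eq_true]
    constructor
    · rintro ⟨i, hmem, hb⟩
      rw [PySem.List.mem_pyRange_neg_one, PySem.List.len_eq] at hmem
      rw [List.any_eq_true] at hb
      obtain ⟨j, hjmem, hc⟩ := hb
      rw [PySem.List.mem_pyRange_neg_one] at hjmem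
      rw [PySem.List.slice_zero_start, PySem.List.slice_to a (by omega), List.contains_iff_mem,
        List.mem_take_iff_getElem] at hc
      obtain ⟨k, hk, hck⟩ := hc
      refine ⟨i.toNat, by omega, j.toNat, by omega, k, by omega, ?_⟩
      rw [PySem.List.pyGetD_eq_getElem a 0 (by omega) (by omega),
        PySem.List.pyGetD_eq_getElem a 0 (by omega) (by omega)] at hck
      rw [List.getD_eq_getElem _ _ (by omega), List.getD_eq_getElem _ _ (by omega),
        List.getD_eq_getElem _ _ (by omega)]
      omega
    · rintro ⟨i, hi, j, hj, k, hk, hsum⟩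
      refine ⟨(i : Int), ?_, ?_⟩
      · rw [PySem.List.mem_pyRange_neg_one, PySem.List.len_eq]; omega
      · rw [List.any_eq_true]
        refine ⟨(j : Int), ?_, ?_⟩
        · rw [PySem.List.mem_pyRange_neg_one]; omega
        · rw [PySem.List.slice_zero_start, PySem.List.slice_to a (by omega), List.contains_iff_mem,
            List.mem_take_iff_getElem]
          refine ⟨k, by simp; omega, ?_⟩
          rw [PySem.List.pyGetD_eq_getElem a 0 (by omega) (by omega),
            PySem.List.pyGetD_eq_getElem a 0 (by omega) (by omega)]
          rw [List.getD_eq_getElem _ _ (by omega), List.getD_eq_getElem _ _ (by omega),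
            List.getD_eq_getElem _ _ (by omega)] at hsum
          simp only [Int.toNat_natCast]
          omega
  by_cases h : hasTriple (sortedSq nums)
  · rw [if_pos h]; exact if_pos (key.mpr ((hasTriple_iff _).mp h))
  · rw [if_neg h]; exact if_neg (fun hc => h ((hasTriple_iff _).mpr (key.mp hc)))

-- soundness and completeness of the two-pointer loop on a sorted list
theorem twoPtr_iff (a : List Int) (t : Int) (hs : List.Pairwise (· ≤ ·) a) :
    ∀ lo hi : Int, 0 ≤ lo → hi < (a.length : Int) →
      (twoPtr a t lo hi = true ↔
        ∃ k j : Nat, lo ≤ (k : Int) ∧ k < j ∧ (j : Int) ≤ hi ∧ a.getD k 0 + a.getD j 0 = t) := by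
  have mono : ∀ p q : Nat, p ≤ q → q < a.length → a.getD p 0 ≤ a.getD q 0 := by
    intro p q hpq hq
    rcases Nat.eq_or_lt_of_le hpq with h | h
    · subst h; exact le_refl _
    · rw [List.getD_eq_getElem _ _ (by omega), List.getD_eq_getElem _ _ hq]
      exact List.pairwise_iff_getElem.mp hs p q (by omega) hq h
  intro lo hi
  induction lo, hi using twoPtr.induct a t with
  | case1 lo hi hlt s hst =>
    intro h0 hlen
    have hst' : PySem.List.pyGetD a lo 0 + PySem.List.pyGetD a hi 0 = t := hst
    rw [twoPtr, if_pos hlt, if_pos hst']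
    constructor
    · intro _
      refine ⟨lo.toNat, hi.toNat, by omega, by omega, by omega, ?_⟩
      have e1 : a.getD lo.toNat 0 = PySem.List.pyGetD a lo 0 := by
        rw [PySem.List.pyGetD_eq_getElem a 0 h0 (by omega), List.getD_eq_getElem _ _ (by omega)]
      have e2 : a.getD hi.toNat 0 = PySem.List.pyGetD a hi 0 := by
        rw [PySem.List.pyGetD_eq_getElem a 0 (by omega) (by omega), List.getD_eq_getElem _ _ (by omega)]
      rw [e1, e2]; exact hst
    · intro _; rfl
  | case2 lo hi hlt s hne hlt2 ih =>
    intro h0 hlen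
    have hne' : ¬ PySem.List.pyGetD a lo 0 + PySem.List.pyGetD a hi 0 = t := hne
    have hlt2' : PySem.List.pyGetD a lo 0 + PySem.List.pyGetD a hi 0 < t := hlt2
    rw [twoPtr, if_pos hlt, if_neg hne', if_pos hlt2']
    rw [ih (by omega) hlen]
    constructor
    · rintro ⟨k, j, h1, h2, h3, h4⟩; exact ⟨k, j, by omega, h2, h3, h4⟩
    · rintro ⟨k, j, h1, h2, h3, h4⟩
      refine ⟨k, j, ?_, h2, h3, h4⟩
      by_contra hk
      have hkl : (k : Int) = lo := by omega
      have e1 : a.getD k 0 = PySem.List.pyGetD a lo 0 := by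
        rw [PySem.List.pyGetD_eq_getElem a 0 h0 (by omega), List.getD_eq_getElem _ _ (by omega)]
        congr 1; omega
      have hj : a.getD j 0 ≤ a.getD hi.toNat 0 := mono j hi.toNat (by omega) (by omega)
      have e2 : a.getD hi.toNat 0 = PySem.List.pyGetD a hi 0 := by
        rw [PySem.List.pyGetD_eq_getElem a 0 (by omega) (by omega), List.getD_eq_getElem _ _ (by omega)]
      omega
  | case3 lo hi hlt s hne hge ih =>
    intro h0 hlen
    have hne' : ¬ PySem.List.pyGetD a lo 0 + PySem.List.pyGetD a hi 0 = t := hne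
    have hge' : ¬ PySem.List.pyGetD a lo 0 + PySem.List.pyGetD a hi 0 < t := hge
    rw [twoPtr, if_pos hlt, if_neg hne', if_neg hge']
    rw [ih h0 (by omega)]
    constructor
    · rintro ⟨k, j, h1, h2, h3, h4⟩; exact ⟨k, j, h1, h2, by omega, h4⟩
    · rintro ⟨k, j, h1, h2, h3, h4⟩
      refine ⟨k, j, h1, h2, ?_, h4⟩
      by_contra hj
      have hjh : (j : Int) = hi := by omega
      have e2 : a.getD j 0 = PySem.List.pyGetD a hi 0 := by
        rw [PySem.List.pyGetD_eq_getElem a 0 (by omega) (by omega), List.getD_eq_getElem _ _ (by omega)]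
        congr 1; omega
      have hk : a.getD lo.toNat 0 ≤ a.getD k 0 := mono lo.toNat k (by omega) (by omega)
      have e1 : a.getD lo.toNat 0 = PySem.List.pyGetD a lo 0 := by
        rw [PySem.List.pyGetD_eq_getElem a 0 h0 (by omega), List.getD_eq_getElem _ _ (by omega)]
      omega
  | case4 lo hi hge =>
    intro h0 hlen
    rw [twoPtr, if_neg hge]
    constructor
    · intro h; cases h
    · rintro ⟨k, j, h1, h2, h3, _⟩; omega

-- B returns "Yes" exactly when the sorted-squares list has an index-ordered triple
theorem triplet_alt_char (nums : List Int) :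
    triplet_alt nums = if hasTriple (sqSorted nums) then "Yes" else "No" := by
  have hs : List.Pairwise (· ≤ ·) (sqSorted nums) :=
    PySem.List.sorted_pairwise (nums.map (fun n => n * n)) (fun x => x)
  have key : ((PySem.List.pyRange ((PySem.List.len (sqSorted nums)) - 1) 1 (-1)).any (fun i =>
       twoPtr (sqSorted nums) (PySem.List.pyGetD (sqSorted nums) i 0) 0 (i - 1)) = true)
      ↔ ∃ i < (sqSorted nums).length, ∃ j < i, ∃ k < j,
          (sqSorted nums).getD k 0 + (sqSorted nums).getD j 0 = (sqSorted nums).getD i 0 := by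
    set a := sqSorted nums with ha
    rw [List.any_eq_true]
    constructor
    · rintro ⟨i, hmem, hb⟩
      rw [PySem.List.mem_pyRange_neg_one, PySem.List.len_eq] at hmem
      rw [twoPtr_iff a _ hs 0 (i - 1) (by omega) (by omega)] at hb
      obtain ⟨k, j, h1, h2, h3, h4⟩ := hb
      refine ⟨i.toNat, by omega, j, by omega, k, by omega, ?_⟩
      rw [PySem.List.pyGetD_eq_getElem a 0 (by omega) (by omega)] at h4
      rw [h4, List.getD_eq_getElem _ _ (by omega)]
    · rintro ⟨i, hi, j, hj, k, hk, hsum⟩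
      refine ⟨(i : Int), ?_, ?_⟩
      · rw [PySem.List.mem_pyRange_neg_one, PySem.List.len_eq]; omega
      · rw [twoPtr_iff a _ hs 0 ((i : Int) - 1) (by omega) (by omega)]
        refine ⟨k, j, by omega, hk, by omega, ?_⟩
        rw [PySem.List.pyGetD_eq_getElem a 0 (by omega) (by omega)]
        simp only [Int.toNat_natCast]
        rw [List.getD_eq_getElem _ _ (by omega), List.getD_eq_getElem _ _ (by omega)]
        rw [List.getD_eq_getElem _ _ (by omega), List.getD_eq_getElem _ _ (by omega),
          List.getD_eq_getElem _ _ (by omega)] at hsum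
        exact hsum
  by_cases h : hasTriple (sqSorted nums)
  · rw [if_pos h]; exact if_pos (key.mpr ((hasTriple_iff _).mp h))
  · rw [if_neg h]; exact if_neg (fun hc => h ((hasTriple_iff _).mpr (key.mp hc)))

-- a sorted list that is a subpermutation of a sorted list is a sublist of it
theorem sorted_subperm_sublist :
    ∀ (b l : List Int), List.Pairwise (· ≤ ·) l → List.Pairwise (· ≤ ·) b →
      l.Subperm b → l.Sublist b := by
  intro b
  induction b with
  | nil => intro l _ _ h; rw [List.subperm_nil.mp h]
  | cons y b' ih =>
    intro l hl hb hsub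
    cases l with
    | nil => exact List.nil_sublist _
    | cons x l' =>
      by_cases hxy : x = y
      · subst hxy
        exact (ih l' (hl.sublist (List.sublist_cons_self x l'))
          (hb.sublist (List.sublist_cons_self x b'))
          ((List.subperm_cons x).mp hsub)).cons₂ x
      · have hx : x ∈ y :: b' := hsub.subset List.mem_cons_self
        have hyx : y < x := by
          rcases List.mem_cons.mp hx with h | h
          · exact absurd h hxy
          · exact lt_of_le_of_ne (List.rel_of_pairwise_cons hb h)
              (fun he => hxy he.symm)
        have hynotin : y ∉ x :: l' := by
          intro hy
          rcases List.mem_cons.mp hy with h | h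
          · exact absurd h.symm (ne_of_gt hyx)
          · exact absurd rfl (ne_of_lt (lt_of_lt_of_le hyx (List.rel_of_pairwise_cons hl h)))
        have hsub' : (x :: l').Subperm b' := by
          rw [List.subperm_ext_iff] at hsub ⊢
          intro v hv
          have hvy : v ≠ y := by rintro rfl; exact hynotin hv
          have h2 := hsub v hv
          rwa [List.count_cons_of_ne hvy.symm] at h2
        exact (ih (x :: l') hl (hb.sublist (List.sublist_cons_self y b')) hsub').cons y

-- any three integers can be listed in increasing order, as a permutation
theorem exists_sorted3 (a b c : Int) :
    ∃ x y z : Int, x ≤ y ∧ y ≤ z ∧ List.Perm [x,y,z] [a,b,c] := by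
  have hp := PySem.List.sorted_perm [a,b,c] (fun x => x) false
  have hs := PySem.List.sorted_pairwise [a,b,c] (fun x => x)
  have hl : (PySem.List.sorted [a,b,c] (fun x => x) false).length = 3 := by
    rw [hp.length_eq]; rfl
  obtain ⟨x,y,z,he⟩ := List.length_eq_three.mp hl
  rw [he] at hp hs
  exact ⟨x, y, z, List.rel_of_pairwise_cons hs (by simp),
    List.rel_of_pairwise_cons (List.pairwise_cons.mp hs).2 (by simp), hp⟩

-- min, max and sum of a triple read off its sorted permutation
theorem minmax3_eq {a b c x y z : Int} (hperm : List.Perm [x,y,z] [a,b,c])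
    (hxy : x ≤ y) (hyz : y ≤ z) :
    min a (min b c) = x ∧ max a (max b c) = z ∧ a + b + c = x + y + z := by
  have hmemx : x ∈ [a,b,c] := hperm.subset (by simp)
  have hmemz : z ∈ [a,b,c] := hperm.subset (by simp)
  have ha : a ∈ [x,y,z] := hperm.symm.subset (by simp)
  have hb : b ∈ [x,y,z] := hperm.symm.subset (by simp)
  have hc : c ∈ [x,y,z] := hperm.symm.subset (by simp)
  have hsum : x + y + z = a + b + c := by
    have := hperm.sum_eq
    simp at this
    omega
  simp only [List.mem_cons, List.not_mem_nil, or_false] at hmemx hmemz ha hb hc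
  refine ⟨?_, ?_, by omega⟩
  · rcases hmemx with h|h|h <;> rcases ha with h1|h1|h1 <;> rcases hb with h2|h2|h2 <;>
      rcases hc with h3|h3|h3 <;> omega
  · rcases hmemz with h|h|h <;> rcases ha with h1|h1|h1 <;> rcases hb with h2|h2|h2 <;>
      rcases hc with h3|h3|h3 <;> omega

-- three increasing positions of a list yield a three-element subpermutation
theorem positions_subperm (l : List Int) {p q r : Nat} (hr : r < l.length) (hq : q < r) (hp : p < q) :
    List.Subperm [l.getD p 0, l.getD q 0, l.getD r 0] l := by
  have hsl := List.map_getElem_sublist (l := l)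
    (is := [⟨p, by omega⟩, ⟨q, by omega⟩, ⟨r, hr⟩]) (by
      refine List.Pairwise.cons ?_ (List.Pairwise.cons ?_ (List.pairwise_singleton _ _))
      · intro a ha
        rcases List.mem_cons.mp ha with rfl | ha
        · exact Fin.mk_lt_mk.mpr hp
        · rw [List.mem_singleton.mp ha]; exact Fin.mk_lt_mk.mpr (by omega)
      · intro a ha
        rw [List.mem_singleton.mp ha]; exact Fin.mk_lt_mk.mpr hq)
  have : [l.getD p 0, l.getD q 0, l.getD r 0] = [l[p], l[q], l[r]] := by
    rw [List.getD_eq_getElem _ _ (by omega), List.getD_eq_getElem _ _ (by omega),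
      List.getD_eq_getElem _ _ hr]
  rw [this]
  exact (by simpa using hsl : List.Sublist [l[p], l[q], l[r]] l).subperm

-- a three-element subpermutation sits at three increasing positions, up to ordering
theorem subperm3_positions (l : List Int) (x y z : Int) (h : List.Subperm [x,y,z] l) :
    ∃ r < l.length, ∃ q < r, ∃ p < q,
      List.Perm [l.getD p 0, l.getD q 0, l.getD r 0] [x,y,z] := by
  obtain ⟨t, htp, hts⟩ := h
  obtain ⟨is, heq, hpw⟩ := List.sublist_eq_map_getElem hts
  have hlen3 : is.length = 3 := by
    have h1 := congrArg List.length heq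
    have h2 := htp.length_eq
    simp at h1 h2; omega
  obtain ⟨f1, f2, f3, rfl⟩ := List.length_eq_three.mp hlen3
  simp only [List.map_cons, List.map_nil] at heq
  have h12 : (f1 : Nat) < f2 := List.rel_of_pairwise_cons hpw (by simp)
  have h23 : (f2 : Nat) < f3 := List.rel_of_pairwise_cons (List.pairwise_cons.mp hpw).2 (by simp)
  refine ⟨f3, f3.isLt, f2, h23, f1, h12, ?_⟩
  have e : [l.getD f1 0, l.getD f2 0, l.getD f3 0] = t := by
    rw [heq]
    rw [List.getD_eq_getElem _ _ f1.isLt, List.getD_eq_getElem _ _ f2.isLt,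
      List.getD_eq_getElem _ _ f3.isLt]
    simp [Fin.getElem_fin]
  rw [e]
  exact htp

-- A's index-ordered triples are exactly the value-ordered square triples of the input
theorem ord_iff (nums : List Int) :
    (∃ i < (sortedSq nums).length, ∃ j < i, ∃ k < j,
      (sortedSq nums).getD k 0 + (sortedSq nums).getD j 0 = (sortedSq nums).getD i 0)
    ↔ DordP nums := by
  have hsp : List.Pairwise (· ≤ ·) (PySem.List.sorted nums (fun x => x) false) :=
    PySem.List.sorted_pairwise nums (fun x => x)
  have hnp : (PySem.List.sorted nums (fun x => x) false).Perm nums :=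
    PySem.List.sorted_perm nums (fun x => x) false
  set s := PySem.List.sorted nums (fun x => x) false with hsdef
  have hlen : (sortedSq nums).length = s.length := List.length_map ..
  constructor
  · rintro ⟨i, hi, j, hj, k, hk, hsum⟩
    rw [List.getD_eq_getElem _ _ (by omega), List.getD_eq_getElem _ _ (by omega),
      List.getD_eq_getElem _ _ (by omega)] at hsum
    simp only [sortedSq, List.getElem_map] at hsum
    rw [hlen] at hi
    have hxy : s[k]'(by omega) ≤ s[j]'(by omega) :=
      List.pairwise_iff_getElem.mp hsp k j (by omega) (by omega) (by omega)
    have hyz : s[j]'(by omega) ≤ s[i]'(by omega) :=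
      List.pairwise_iff_getElem.mp hsp j i (by omega) hi hj
    have hsum' : s[k]'(by omega) * s[k]'(by omega) + s[j]'(by omega) * s[j]'(by omega)
        = s[i]'(by omega) * s[i]'(by omega) := by
      rw [← pow_two, ← pow_two, ← pow_two]
      exact hsum
    have hsub : List.Sublist [s[k]'(by omega), s[j]'(by omega), s[i]'(by omega)] s := by
      have := List.map_getElem_sublist (l := s)
        (is := [⟨k, by omega⟩, ⟨j, by omega⟩, ⟨i, hi⟩]) (by
          refine List.Pairwise.cons ?_ (List.Pairwise.cons ?_ (List.pairwise_singleton _ _))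
          · intro a ha
            rcases List.mem_cons.mp ha with rfl | ha
            · exact Fin.mk_lt_mk.mpr hk
            · rw [List.mem_singleton.mp ha]; exact Fin.mk_lt_mk.mpr (by omega)
          · intro a ha
            rw [List.mem_singleton.mp ha]; exact Fin.mk_lt_mk.mpr hj)
      simpa using this
    have hsper := hsub.subperm.trans hnp.subperm
    obtain ⟨r, hrl, q, hqr, p, hpq, hperm⟩ := subperm3_positions nums _ _ _ hsper
    obtain ⟨e1, e2, e3⟩ := minmax3_eq hperm.symm hxy hyz
    refine ⟨r, hrl, q, hqr, p, hpq, ?_⟩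
    simp only
    rw [e1, e2]
    have : nums.getD p 0 + nums.getD q 0 + nums.getD r 0 - s[k]'(by omega) - s[i]'(by omega)
        = s[j]'(by omega) := by omega
    rw [this]
    exact hsum'
  · rintro ⟨r, hrl, q, hqr, p, hpq, hcond⟩
    simp only at hcond
    obtain ⟨x, y, z, hxy, hyz, hperm⟩ :=
      exists_sorted3 (nums.getD p 0) (nums.getD q 0) (nums.getD r 0)
    obtain ⟨e1, e2, e3⟩ := minmax3_eq hperm hxy hyz
    rw [e1, e2] at hcond
    have emid : nums.getD p 0 + nums.getD q 0 + nums.getD r 0 - x - z = y := by omega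
    rw [emid] at hcond
    have hsub3 : List.Subperm [x, y, z] s :=
      (hperm.subperm.trans (positions_subperm nums hrl hqr hpq)).trans hnp.symm.subperm
    have hpw3 : List.Pairwise (· ≤ ·) [x, y, z] := by
      refine List.Pairwise.cons ?_ (List.Pairwise.cons ?_ (List.pairwise_singleton _ _))
      · intro a ha
        rcases List.mem_cons.mp ha with rfl | ha
        · exact hxy
        · rw [List.mem_singleton.mp ha]; exact le_trans hxy hyz
      · intro a ha
        rw [List.mem_singleton.mp ha]; exact hyz
    have hsl3 := sorted_subperm_sublist s _ hpw3 hsp hsub3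
    obtain ⟨is, heq, hpw⟩ := List.sublist_eq_map_getElem hsl3
    have hlen3 : is.length = 3 := by
      have := congrArg List.length heq; simp at this; omega
    obtain ⟨f1, f2, f3, rfl⟩ := List.length_eq_three.mp hlen3
    simp only [List.map_cons, List.map_nil, List.cons.injEq, and_true] at heq
    obtain ⟨g1, g2, g3⟩ := heq
    simp only [Fin.getElem_fin] at g1 g2 g3
    have h12 : (f1 : Nat) < f2 := List.rel_of_pairwise_cons hpw (by simp)
    have h23 : (f2 : Nat) < f3 := List.rel_of_pairwise_cons (List.pairwise_cons.mp hpw).2 (by simp)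
    refine ⟨f3, by omega, f2, h23, f1, h12, ?_⟩
    rw [List.getD_eq_getElem _ _ (by omega), List.getD_eq_getElem _ _ (by omega),
      List.getD_eq_getElem _ _ (by omega)]
    simp only [sortedSq, List.getElem_map]
    rw [← g1, ← g2, ← g3, pow_two, pow_two, pow_two]
    exact hcond

-- a three-element subpermutation summing as u+v=w (u,v nonnegative) yields an index triple after sorting
theorem triple_of_subperm (m : List Int) (u v w : Int) (hu : 0 ≤ u) (hv : 0 ≤ v)
    (hsub : List.Subperm [u,v,w] m) (hsum : u + v = w) :
    ∃ i < (PySem.List.sorted m (fun x => x) false).length, ∃ j < i, ∃ k < j,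
      (PySem.List.sorted m (fun x => x) false).getD k 0
        + (PySem.List.sorted m (fun x => x) false).getD j 0
        = (PySem.List.sorted m (fun x => x) false).getD i 0 := by
  have hbs : List.Pairwise (· ≤ ·) (PySem.List.sorted m (fun x => x) false) :=
    PySem.List.sorted_pairwise m (fun x => x)
  set b := PySem.List.sorted m (fun x => x) false with hbdef
  have hsub2 : List.Subperm [u, v, w] b :=
    hsub.trans (PySem.List.sorted_perm m (fun x => x) false).symm.subperm
  have htri : List.Perm [min u v, max u v, w] [u, v, w] := by
    rcases le_total u v with hle | hle
    · rw [min_eq_left hle, max_eq_right hle]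
    · rw [min_eq_right hle, max_eq_left hle]
      exact List.Perm.swap _ _ _
  have hsp2 : List.Subperm [min u v, max u v, w] b := htri.subperm.trans hsub2
  have hsorted3 : List.Pairwise (· ≤ ·) [min u v, max u v, w] := by
    have h1 : max u v ≤ w := by
      rw [← hsum]
      exact max_le (le_add_of_nonneg_right hv) (le_add_of_nonneg_left hu)
    refine List.Pairwise.cons ?_ (List.Pairwise.cons ?_ (List.pairwise_singleton _ _))
    · intro a ha
      rcases List.mem_cons.mp ha with rfl | ha
      · exact min_le_max
      · rw [List.mem_singleton.mp ha]; exact le_trans min_le_max h1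
    · intro a ha
      rw [List.mem_singleton.mp ha]; exact h1
  have hsl2 := sorted_subperm_sublist b _ hsorted3 hbs hsp2
  obtain ⟨is, heq, hpw⟩ := List.sublist_eq_map_getElem hsl2
  have hlen3 : is.length = 3 := by
    have := congrArg List.length heq; simpa using this.symm
  obtain ⟨f1, f2, f3, rfl⟩ := List.length_eq_three.mp hlen3
  simp only [List.map_cons, List.map_nil, List.cons.injEq, and_true] at heq
  obtain ⟨e1, e2, e3⟩ := heq
  simp only [Fin.getElem_fin] at e1 e2 e3
  have h12 : (f1 : Nat) < f2 := List.rel_of_pairwise_cons hpw (by simp)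
  have h23 : (f2 : Nat) < f3 :=
    List.rel_of_pairwise_cons (List.pairwise_cons.mp hpw).2 (by simp)
  refine ⟨f3, f3.isLt, f2, h23, f1, h12, ?_⟩
  rw [List.getD_eq_getElem _ _ f1.isLt, List.getD_eq_getElem _ _ f2.isLt,
    List.getD_eq_getElem _ _ f3.isLt, ← e1, ← e2, ← e3, min_add_max]
  exact hsum

-- B's index-ordered triples of the sorted squares are exactly the unordered square triples
theorem unord_iff (nums : List Int) :
    (∃ i < (sqSorted nums).length, ∃ j < i, ∃ k < j,
      (sqSorted nums).getD k 0 + (sqSorted nums).getD j 0 = (sqSorted nums).getD i 0)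
    ↔ DunP nums := by
  have hmp : (sqSorted nums).Perm (nums.map (fun n => n * n)) :=
    PySem.List.sorted_perm (nums.map (fun n => n * n)) (fun x => x) false
  have hlm : (nums.map (fun n => n * n)).length = nums.length := List.length_map ..
  constructor
  · rintro ⟨i, hi, j, hj, k, hk, hsum⟩
    rw [List.getD_eq_getElem _ _ (by omega), List.getD_eq_getElem _ _ (by omega),
      List.getD_eq_getElem _ _ hi] at hsum
    have hsub : List.Sublist [(sqSorted nums)[k]'(by omega), (sqSorted nums)[j]'(by omega),
        (sqSorted nums)[i]'hi] (sqSorted nums) := by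
      have := List.map_getElem_sublist (l := sqSorted nums)
        (is := [⟨k, by omega⟩, ⟨j, by omega⟩, ⟨i, hi⟩]) (by
          refine List.Pairwise.cons ?_ (List.Pairwise.cons ?_ (List.pairwise_singleton _ _))
          · intro a ha
            rcases List.mem_cons.mp ha with rfl | ha
            · exact Fin.mk_lt_mk.mpr hk
            · rw [List.mem_singleton.mp ha]; exact Fin.mk_lt_mk.mpr (by omega)
          · intro a ha
            rw [List.mem_singleton.mp ha]; exact Fin.mk_lt_mk.mpr hj)
      simpa using this
    have hsper := hsub.subperm.trans hmp.subperm
    obtain ⟨r, hrl, q, hqr, p, hpq, hperm⟩ :=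
      subperm3_positions (nums.map (fun n => n * n)) _ _ _ hsper
    have egD : ∀ t : Nat, t < nums.length →
        (nums.map (fun n => n * n)).getD t 0 = nums.getD t 0 * nums.getD t 0 := by
      intro t ht
      rw [List.getD_eq_getElem _ _ (by omega), List.getD_eq_getElem _ _ ht, List.getElem_map]
    rw [hlm] at hrl
    refine ⟨r, hrl, q, hqr, p, hpq, ?_⟩
    simp only
    rw [← egD p (by omega), ← egD q (by omega), ← egD r hrl]
    have hw : (sqSorted nums)[i]'hi ∈ [(nums.map (fun n => n * n)).getD p 0,
        (nums.map (fun n => n * n)).getD q 0, (nums.map (fun n => n * n)).getD r 0] :=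
      hperm.symm.subset (by simp)
    have hsm := hperm.sum_eq
    simp only [List.sum_cons, List.sum_nil, List.mem_cons,
      List.not_mem_nil, or_false] at hw hsm
    set A := (nums.map (fun n => n * n)).getD p 0
    set B := (nums.map (fun n => n * n)).getD q 0
    set C := (nums.map (fun n => n * n)).getD r 0
    set U := (sqSorted nums)[k]'(by omega)
    set V := (sqSorted nums)[j]'(by omega)
    set W := (sqSorted nums)[i]'hi
    rcases hw with h | h | h
    · right; right; linarith
    · right; left; linarith
    · left; linarith
  · rintro ⟨r, hrl, q, hqr, p, hpq, hcond⟩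
    simp only at hcond
    have egD : ∀ t : Nat, t < nums.length →
        (nums.map (fun n => n * n)).getD t 0 = nums.getD t 0 * nums.getD t 0 := by
      intro t ht
      rw [List.getD_eq_getElem _ _ (by omega), List.getD_eq_getElem _ _ ht, List.getElem_map]
    have hsubm : List.Subperm [(nums.map (fun n => n * n)).getD p 0,
        (nums.map (fun n => n * n)).getD q 0, (nums.map (fun n => n * n)).getD r 0]
        (nums.map (fun n => n * n)) :=
      positions_subperm _ (by omega) hqr hpq
    rw [egD p (by omega), egD q (by omega), egD r hrl] at hsubm
    set a := nums.getD p 0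
    set b := nums.getD q 0
    set c := nums.getD r 0
    rcases hcond with h | h | h
    · exact triple_of_subperm _ _ _ _ (mul_self_nonneg a) (mul_self_nonneg b) hsubm h
    · have hperm : List.Perm [a*a, c*c, b*b] [a*a, b*b, c*c] :=
        List.Perm.cons _ (List.Perm.swap _ _ _)
      exact triple_of_subperm _ _ _ _ (mul_self_nonneg a) (mul_self_nonneg c)
        (hperm.subperm.trans hsubm) h
    · have hperm : List.Perm [b*b, c*c, a*a] [a*a, b*b, c*c] :=
        ((List.Perm.cons _ (List.Perm.swap _ _ _)).trans (List.Perm.swap _ _ _))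
      exact triple_of_subperm _ _ _ _ (mul_self_nonneg b) (mul_self_nonneg c)
        (hperm.subperm.trans hsubm) h

-- the erase-chain membership encodes exactly a three-element subpermutation
theorem subperm3_erase (l : List Int) (x y z : Int) :
    (x ∈ l ∧ y ∈ l.erase x ∧ z ∈ (l.erase x).erase y) ↔ List.Subperm [x,y,z] l := by
  constructor
  · rintro ⟨h1, h2, h3⟩
    have hz : [z].Subperm ((l.erase x).erase y) := List.singleton_subperm_iff.mpr h3
    have hyz : [y, z].Subperm (l.erase x) :=
      ((List.subperm_cons y).mpr hz).trans (List.perm_cons_erase h2).symm.subperm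
    exact ((List.subperm_cons x).mpr hyz).trans (List.perm_cons_erase h1).symm.subperm
  · intro h
    have hx : x ∈ l := h.subset (by simp)
    have tail : ∀ (a : Int) (t m : List Int), (a :: t).Subperm m → t.Subperm (m.erase a) := by
      intro a t m hs
      rw [List.subperm_ext_iff] at hs ⊢
      intro v hv
      have := hs v (List.mem_cons_of_mem a hv)
      rw [List.count_erase]
      rw [List.count_cons] at this
      by_cases hva : v = a <;> simp [hva] at this ⊢ <;> omega
    have h2 := tail x [y,z] l h
    have h3 := tail y [z] (l.erase x) h2
    exact ⟨hx, h2.subset (by simp), by simpa using (List.singleton_subperm_iff).mp h3⟩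

-- a value-ordered square triple is in particular an unordered one
theorem Dord_imp_Dun (nums : List Int) : Dtrip nums False → Dtrip nums True := by
  rintro ⟨x, h1, y, h2, z, h3, _, heq⟩
  exact ⟨x, h1, y, h2, z, h3, Or.inl trivial, heq⟩

-- the positional and the sub-multiset forms of the unordered condition agree
theorem DunP_iff (nums : List Int) : DunP nums ↔ Dtrip nums True := by
  constructor
  · rintro ⟨r, hrl, q, hqr, p, hpq, hcond⟩
    simp only at hcond
    have hsub := positions_subperm nums hrl hqr hpq
    set a := nums.getD p 0
    set b := nums.getD q 0
    set c := nums.getD r 0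
    rcases hcond with h | h | h
    · obtain ⟨m1, m2, m3⟩ := (subperm3_erase nums a b c).mpr hsub
      exact ⟨a, m1, b, m2, c, m3, Or.inl trivial, h⟩
    · have hperm : List.Perm [a, c, b] [a, b, c] := List.Perm.cons _ (List.Perm.swap _ _ _)
      obtain ⟨m1, m2, m3⟩ := (subperm3_erase nums a c b).mpr (hperm.subperm.trans hsub)
      exact ⟨a, m1, c, m2, b, m3, Or.inl trivial, h⟩
    · have hperm : List.Perm [b, c, a] [a, b, c] :=
        (List.Perm.cons _ (List.Perm.swap _ _ _)).trans (List.Perm.swap _ _ _)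
      obtain ⟨m1, m2, m3⟩ := (subperm3_erase nums b c a).mpr (hperm.subperm.trans hsub)
      exact ⟨b, m1, c, m2, a, m3, Or.inl trivial, h⟩
  · rintro ⟨x, h1, y, h2, z, h3, _, heq⟩
    have hsub := (subperm3_erase nums x y z).mp ⟨h1, h2, h3⟩
    obtain ⟨r, hrl, q, hqr, p, hpq, hperm⟩ := subperm3_positions nums _ _ _ hsub
    refine ⟨r, hrl, q, hqr, p, hpq, ?_⟩
    simp only
    have hzm : z ∈ [nums.getD p 0, nums.getD q 0, nums.getD r 0] := hperm.symm.subset (by simp)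
    have hsq := (hperm.map (fun t => t * t)).sum_eq
    simp only [List.map_cons, List.map_nil, List.sum_cons, List.sum_nil] at hsq
    simp only [List.mem_cons, List.not_mem_nil, or_false] at hzm
    set a := nums.getD p 0
    set b := nums.getD q 0
    set c := nums.getD r 0
    rcases hzm with h | h | h
    · have hzz : z * z = a * a := by rw [h]
      right; right; linarith
    · have hzz : z * z = b * b := by rw [h]
      right; left; linarith
    · have hzz : z * z = c * c := by rw [h]
      left; linarith

-- the positional and the sub-multiset forms of the ordered condition agree
theorem DordP_iff (nums : List Int) : DordP nums ↔ Dtrip nums False := by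
  constructor
  · rintro ⟨r, hrl, q, hqr, p, hpq, hcond⟩
    simp only at hcond
    obtain ⟨x, y, z, hxy, hyz, hperm⟩ :=
      exists_sorted3 (nums.getD p 0) (nums.getD q 0) (nums.getD r 0)
    obtain ⟨e1, e2, e3⟩ := minmax3_eq hperm hxy hyz
    rw [e1, e2] at hcond
    have emid : nums.getD p 0 + nums.getD q 0 + nums.getD r 0 - x - z = y := by omega
    rw [emid] at hcond
    have hsub := hperm.subperm.trans (positions_subperm nums hrl hqr hpq)
    obtain ⟨m1, m2, m3⟩ := (subperm3_erase nums x y z).mpr hsub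
    exact ⟨x, m1, y, m2, z, m3, Or.inr ⟨hxy, hyz⟩, hcond⟩
  · rintro ⟨x, h1, y, h2, z, h3, hc, heq⟩
    rcases hc with hF | ⟨hxy, hyz⟩
    · exact hF.elim
    have hsub := (subperm3_erase nums x y z).mp ⟨h1, h2, h3⟩
    obtain ⟨r, hrl, q, hqr, p, hpq, hperm⟩ := subperm3_positions nums _ _ _ hsub
    obtain ⟨e1, e2, e3⟩ := minmax3_eq hperm.symm hxy hyz
    refine ⟨r, hrl, q, hqr, p, hpq, ?_⟩
    simp only
    rw [e1, e2]
    have : nums.getD p 0 + nums.getD q 0 + nums.getD r 0 - x - z = y := by omega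
    rw [this]
    exact heq

-- ===== VERDICT (by name: the statement is the Claim_ definition above) =====
theorem triplet_spec : Claim_unchanged_triplet := by
  intro nums _ hnd
  rw [triplet_char, triplet_alt_char]
  unfold D_triplet at hnd
  by_cases hS : hasTriple (sqSorted nums)
  · have hDun : Dtrip nums True := (DunP_iff nums).mp ((unord_iff nums).mp ((hasTriple_iff _).mp hS))
    have hDord : Dtrip nums False := by by_contra h; exact hnd ⟨hDun, h⟩
    have hO : hasTriple (sortedSq nums) = true :=
      (hasTriple_iff _).mpr ((ord_iff nums).mpr ((DordP_iff nums).mpr hDord))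
    simp [hS, hO]
  · have hO : ¬ hasTriple (sortedSq nums) = true := fun h =>
      hS ((hasTriple_iff _).mpr ((unord_iff nums).mpr ((DunP_iff nums).mpr
        (Dord_imp_Dun nums ((DordP_iff nums).mp ((ord_iff nums).mp ((hasTriple_iff _).mp h)))))))
    simp [hS, hO]

theorem triplet_changed : Claim_changed_triplet := by
  unfold Claim_changed_triplet
  refine ⟨by decide, by decide, ?_, ?_, by decide⟩
  · rw [triplet_char, if_neg (by decide)]; rfl
  · rw [triplet_alt_char, if_pos (by decide)]; rfl

theorem triplet_tight : Claim_exact_triplet := by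
  intro nums _ hd
  rw [triplet_char, triplet_alt_char]
  obtain ⟨hDun, hDord⟩ := hd
  have hS : hasTriple (sqSorted nums) = true :=
    (hasTriple_iff _).mpr ((unord_iff nums).mpr ((DunP_iff nums).mpr hDun))
  have hO : ¬ hasTriple (sortedSq nums) = true := fun h =>
    hDord ((DordP_iff nums).mp ((ord_iff nums).mp ((hasTriple_iff _).mp h)))
  simp [hS, hO]
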